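-- pv_equiv track=rewrite | github.com/chinmayaNK22/Variant-Proteome-DB-Generator | protein_digestor.py | Chymotrypsin
-- ===== SOURCE A (Python) =====
-- def Chymotrypsin(sequence, missed_clevage, pep_min_len, pep_max_len):
--     if 'F' in sequence or 'W' in sequence or 'Y' in sequence:
--         get_dup_f = [i for i in range(len(sequence)) if sequence.startswith('F', i)]
--         get_dup_w = [j for j in range(len(sequence)) if sequence.startswith('W', j)]
--         get_dup_y = [j for j in range(len(sequence)) if sequence.startswith('Y', j)]
--         merge_list = sorted(get_dup_f + get_dup_w + get_dup_y)
--         merge_list_fltrd = [i for i in merge_list if i+1 < len(sequence) and sequence[i + 1] !='P'] #look for KP or RP position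
--         merge_list_fltrd.append(len(sequence))
--         initialize = 0
--         for iter_lst in range(len(merge_list_fltrd) - int(missed_clevage)):
--             peptide = (sequence[initialize: int(merge_list_fltrd[iter_lst + missed_clevage]) + 1])
--             if len(peptide) >= int(pep_min_len) and len(peptide) <= int(pep_max_len):
--                 yield peptide
--             initialize = merge_list_fltrd[iter_lst] + 1
-- ===== SOURCE B (Python) =====
-- def Chymotrypsin(sequence, missed_clevage, pep_min_len, pep_max_len):
--     # Single streaming pass with a FIFO of pending peptide starts:
--     # no position lists are built and nothing is sorted.
--     if 'F' in sequence or 'W' in sequence or 'Y' in sequence: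
--         n = len(sequence)
--         starts = [0]  # pending peptide start positions (at most missed_clevage+1)
--         for i in range(n + 1):
--             if i < n and not (sequence[i] in 'FWY' and i + 1 < n and sequence[i + 1] != 'P'):
--                 continue
--             # i is a cleavage boundary (index n is the terminal boundary)
--             if len(starts) == int(missed_clevage) + 1:
--                 peptide = sequence[starts.pop(0): i + 1]
--                 if int(pep_min_len) <= len(peptide) <= int(pep_max_len):
--                     yield peptide
--             starts.append(i + 1)
-- ===== Notes on version B (the rewrite author's own statement) =====
-- stated objective: alternative
-- what changed: Replaces A's three full startswith scans, list concatenation, sort and index-driven loop by one streaming left-to-right pass that keeps a FIFO of at most missed_clevage+1 pending peptide starts and emits each peptide as soon as its closing boundary is seen.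
import Mathlib
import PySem

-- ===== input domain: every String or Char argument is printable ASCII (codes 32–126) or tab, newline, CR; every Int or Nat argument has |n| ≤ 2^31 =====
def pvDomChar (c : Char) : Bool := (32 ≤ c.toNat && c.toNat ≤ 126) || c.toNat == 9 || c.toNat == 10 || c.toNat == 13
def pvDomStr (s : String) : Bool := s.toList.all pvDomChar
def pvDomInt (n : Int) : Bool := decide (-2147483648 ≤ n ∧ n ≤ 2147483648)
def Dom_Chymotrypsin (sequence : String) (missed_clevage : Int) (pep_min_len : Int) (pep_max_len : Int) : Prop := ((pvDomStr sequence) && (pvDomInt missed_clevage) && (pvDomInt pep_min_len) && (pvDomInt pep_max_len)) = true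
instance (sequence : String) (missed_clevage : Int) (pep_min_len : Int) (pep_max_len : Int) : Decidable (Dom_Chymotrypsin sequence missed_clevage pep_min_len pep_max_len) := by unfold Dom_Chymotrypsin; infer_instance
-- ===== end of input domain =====

-- B replaces A's three position scans + sort + index-driven loop by one streaming pass with a FIFO of
-- pending peptide starts. Both Pythons are generators; the equivalence is about the list of yielded peptides.

-- ===== PORT A =====
-- Python: sequence.startswith(c, i) — prefix test on the slice sequence[i:] (start offset follows slice rules; exact)
def pyStartswithFrom (cs : List Char) (p : List Char) (i : Int) : Bool :=
  PySem.Chars.startswith (PySem.List.slice cs (some i) none) p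

-- body of A's for-loop (a yield becomes an append to the accumulator)
def stepA (seq : String) (L : List Int) (mc lo hi : Int) (st : Int × List String) (iter_lst : Int) : Int × List String :=
  let peptide := PySem.Str.slice seq (some st.1) (some (PySem.List.pyGetD L (iter_lst + mc) 0 + 1))
  let acc := if decide (lo ≤ PySem.Str.len peptide) && decide (PySem.Str.len peptide ≤ hi) then st.2 ++ [peptide] else st.2
  (PySem.List.pyGetD L iter_lst 0 + 1, acc)

def Chymotrypsin (sequence : String) (missed_clevage : Int) (pep_min_len : Int) (pep_max_len : Int) : List String :=
  if PySem.Str.isIn "F" sequence || PySem.Str.isIn "W" sequence || PySem.Str.isIn "Y" sequence then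
    let cs := sequence.toList
    let n : Int := PySem.Str.len sequence
    let get_dup_f := (PySem.List.pyRange 0 n 1).filter (fun i => pyStartswithFrom cs ['F'] i)
    let get_dup_w := (PySem.List.pyRange 0 n 1).filter (fun j => pyStartswithFrom cs ['W'] j)
    let get_dup_y := (PySem.List.pyRange 0 n 1).filter (fun j => pyStartswithFrom cs ['Y'] j)
    let merge_list := PySem.List.sorted (get_dup_f ++ get_dup_w ++ get_dup_y) (fun x => x) false
    let merge_list_fltrd := merge_list.filter (fun i => decide (i + 1 < n) && (PySem.List.pyGetD cs (i + 1) ' ' != 'P'))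
    let fltrd := merge_list_fltrd ++ [n]   -- merge_list_fltrd.append(len(sequence))
    -- int(missed_clevage), int(pep_min_len), int(pep_max_len) are identities on Int
    ((PySem.List.pyRange 0 ((fltrd.length : Int) - missed_clevage) 1).foldl
      (stepA sequence fltrd missed_clevage pep_min_len pep_max_len) (0, [])).2
  else []

-- ===== PORT B =====
-- B's boundary test: sequence[i] in 'FWY' and i + 1 < n and sequence[i + 1] != 'P'
def bndP (cs : List Char) (n : Int) (i : Int) : Bool :=
  PySem.Chars.isIn [PySem.List.pyGetD cs i ' '] ['F', 'W', 'Y'] && decide (i + 1 < n) && (PySem.List.pyGetD cs (i + 1) ' ' != 'P')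

-- body of B's loop once i is a boundary (starts.pop(0) = head + tail)
def gB (seq : String) (mc lo hi : Int) (st : List Int × List String) (i : Int) : List Int × List String :=
  if (st.1.length : Int) = mc + 1 then
    let peptide := PySem.Str.slice seq (some (PySem.List.pyGetD st.1 0 0)) (some (i + 1))
    let acc := if decide (lo ≤ PySem.Str.len peptide) && decide (PySem.Str.len peptide ≤ hi) then st.2 ++ [peptide] else st.2
    (st.1.tail ++ [i + 1], acc)
  else (st.1 ++ [i + 1], st.2)

def stepB (seq : String) (cs : List Char) (n mc lo hi : Int) (st : List Int × List String) (i : Int) : List Int × List String :=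
  if decide (i < n) && !bndP cs n i then st   -- continue
  else gB seq mc lo hi st i

def Chymotrypsin_alt (sequence : String) (missed_clevage : Int) (pep_min_len : Int) (pep_max_len : Int) : List String :=
  if PySem.Str.isIn "F" sequence || PySem.Str.isIn "W" sequence || PySem.Str.isIn "Y" sequence then
    let cs := sequence.toList
    let n : Int := PySem.Str.len sequence
    ((PySem.List.pyRange 0 (n + 1) 1).foldl
      (stepB sequence cs n missed_clevage pep_min_len pep_max_len) ([0], [])).2
  else []

-- ===== PRECONDITION & SPEC =====
-- Pre_ excludes exactly the inputs on which A raises IndexError: a negative missed_clevage together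
-- with a cleavable residue (F/W/Y) somewhere in the sequence; A returns normally everywhere else.
def Pre_Chymotrypsin (sequence : String) (missed_clevage : Int) (pep_min_len : Int) (pep_max_len : Int) : Prop :=
  0 ≤ missed_clevage ∨ (PySem.Str.isIn "F" sequence || PySem.Str.isIn "W" sequence || PySem.Str.isIn "Y" sequence) = false
instance (sequence : String) (missed_clevage : Int) (pep_min_len : Int) (pep_max_len : Int) : Decidable (Pre_Chymotrypsin sequence missed_clevage pep_min_len pep_max_len) := by unfold Pre_Chymotrypsin; infer_instance

def pvWitness_Chymotrypsin : String × Int × Int × Int := ("FAYK", 1, 1, 30)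

def Spec_Chymotrypsin (sequence : String) (missed_clevage : Int) (pep_min_len : Int) (pep_max_len : Int) (out : List String) : Prop := out = Chymotrypsin_alt sequence missed_clevage pep_min_len pep_max_len
instance (sequence : String) (missed_clevage : Int) (pep_min_len : Int) (pep_max_len : Int) (out : List String) : Decidable (Spec_Chymotrypsin sequence missed_clevage pep_min_len pep_max_len out) := by unfold Spec_Chymotrypsin; infer_instance

-- ===== CLAIM (what is proved, stated in full; the proofs are below) =====
def Claim_equal_Chymotrypsin : Prop := ∀ (sequence : String) (missed_clevage : Int) (pep_min_len : Int) (pep_max_len : Int), Dom_Chymotrypsin sequence missed_clevage pep_min_len pep_max_len → Pre_Chymotrypsin sequence missed_clevage pep_min_len pep_max_len → Spec_Chymotrypsin sequence missed_clevage pep_min_len pep_max_len (Chymotrypsin sequence missed_clevage pep_min_len pep_max_len)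

-- ===== LEMMAS AND PROOFS =====

-- start position of the peptide whose emission index is t (0, or one past boundary t-1)
def sGet (L : List Int) (t : Nat) : Int :=
  if t = 0 then 0 else PySem.List.pyGetD L ((t : Int) - 1) 0 + 1

-- the peptide emitted by A's iteration t (as a 0- or 1-element list)
def emitT (seq : String) (L : List Int) (mc' : Nat) (lo hi : Int) (t : Nat) : List String :=
  let pep := PySem.Str.slice seq (some (sGet L t)) (some (PySem.List.pyGetD L ((t + mc' : Nat) : Int) 0 + 1))
  if decide (lo ≤ PySem.Str.len pep) && decide (PySem.Str.len pep ≤ hi) then [pep] else []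

-- the peptide emitted by B while consuming boundary number j
def emitJ (seq : String) (L : List Int) (mc' : Nat) (lo hi : Int) (j : Nat) : List String :=
  if mc' ≤ j then
    (let pep := PySem.Str.slice seq (some (sGet L (j - mc'))) (some (PySem.List.pyGetD L (j : Int) 0 + 1))
     if decide (lo ≤ PySem.Str.len pep) && decide (PySem.Str.len pep ≤ hi) then [pep] else [])
  else []

-- B's FIFO after consuming the first j boundaries
def startsOf (L : List Int) (mc' j : Nat) : List Int :=
  (List.range' (j - mc') (min j mc' + 1)).map (sGet L)

lemma foldl_skip {σ : Type} (l : List Int) (p : Int → Bool) (g : σ → Int → σ) (init : σ) :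
    l.foldl (fun st i => if p i then st else g st i) init = (l.filter (fun i => !p i)).foldl g init := by
  rw [List.foldl_filter]
  congr 1; funext st i; cases h : p i <;> simp

lemma charAt (cs : List Char) (c : Char) (i : Int) (h0 : 0 ≤ i) (h1 : i < (cs.length : Int)) :
    pyStartswithFrom cs [c] i = (PySem.List.pyGetD cs i ' ' == c) := by
  have hlt : i.toNat < cs.length := by omega
  rw [pyStartswithFrom, PySem.List.slice_from cs h0,
    PySem.List.pyGetD_eq_getElem cs ' ' h0 h1, Bool.eq_iff_iff,
    PySem.Chars.startswith_iff, beq_iff_eq,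
    List.drop_eq_getElem_cons hlt, List.cons_prefix_cons]
  simp [eq_comm]
lemma isIn_singleton (x : Char) :
    PySem.Chars.isIn [x] ['F', 'W', 'Y'] = (x == 'F' || x == 'W' || x == 'Y') := by
  rw [Bool.eq_iff_iff, PySem.Chars.isIn_iff_infix, List.singleton_infix_iff]
  simp [or_assoc]
lemma filter3_perm {α : Type} (p q r : α → Bool) (xs : List α)
    (h : ∀ x ∈ xs, (p x && q x) = false ∧ (p x && r x) = false ∧ (q x && r x) = false) :
    (xs.filter p ++ xs.filter q ++ xs.filter r).Perm (xs.filter (fun x => p x || q x || r x)) := by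
  induction xs with
  | nil => simp
  | cons a xs ih =>
    have ha := h a (by simp)
    have ih' := ih (fun x hx => h x (by simp [hx]))
    have ih'' : (xs.filter p ++ (xs.filter q ++ xs.filter r)).Perm
        (xs.filter (fun x => p x || q x || r x)) := by simpa [List.append_assoc] using ih'
    cases hp : p a <;> cases hq : q a <;> cases hr : r a <;>
      simp [hp, hq, hr] at ha ⊢
    · exact ih''
    · exact ((List.Perm.append_left (xs.filter p) List.perm_middle).trans
        (List.perm_middle.trans (ih''.cons a)))
    · exact List.perm_middle.trans (ih''.cons a)
    · exact ih''
-- A's sorted-and-filtered boundary positions are the single filtered scan B performs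
lemma boundary_eq (cs : List Char) :
    (PySem.List.sorted
        (((PySem.List.pyRange 0 (cs.length : Int) 1).filter (fun i => pyStartswithFrom cs ['F'] i)) ++
         ((PySem.List.pyRange 0 (cs.length : Int) 1).filter (fun j => pyStartswithFrom cs ['W'] j)) ++
         ((PySem.List.pyRange 0 (cs.length : Int) 1).filter (fun j => pyStartswithFrom cs ['Y'] j)))
        (fun x => x) false).filter
      (fun i => decide (i + 1 < (cs.length : Int)) && (PySem.List.pyGetD cs (i + 1) ' ' != 'P')) =
    (PySem.List.pyRange 0 (cs.length : Int) 1).filter (fun i => bndP cs (cs.length : Int) i) := by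
  have hmem : ∀ i ∈ PySem.List.pyRange 0 (cs.length : Int) 1, 0 ≤ i ∧ i < (cs.length : Int) :=
    fun i hi => PySem.List.mem_pyRange_one.mp hi
  have hrw : ∀ c : Char,
      (PySem.List.pyRange 0 (cs.length : Int) 1).filter (fun i => pyStartswithFrom cs [c] i) =
      (PySem.List.pyRange 0 (cs.length : Int) 1).filter (fun i => PySem.List.pyGetD cs i ' ' == c) :=
    fun c => List.filter_congr (fun i hi => charAt cs c i (hmem i hi).1 (hmem i hi).2)
  rw [hrw 'F', hrw 'W', hrw 'Y']
  have hexcl : ∀ x ∈ PySem.List.pyRange 0 (cs.length : Int) 1,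
      ((PySem.List.pyGetD cs x ' ' == 'F') && (PySem.List.pyGetD cs x ' ' == 'W')) = false ∧
      ((PySem.List.pyGetD cs x ' ' == 'F') && (PySem.List.pyGetD cs x ' ' == 'Y')) = false ∧
      ((PySem.List.pyGetD cs x ' ' == 'W') && (PySem.List.pyGetD cs x ' ' == 'Y')) = false := by
    intro x _
    refine ⟨?_, ?_, ?_⟩ <;> cases h : (PySem.List.pyGetD cs x ' ') <;> simp_all
  have hperm := filter3_perm _ _ _ _ hexcl
  have hpw : ((PySem.List.pyRange 0 (cs.length : Int) 1).filter
      (fun x => (PySem.List.pyGetD cs x ' ' == 'F') || (PySem.List.pyGetD cs x ' ' == 'W') || (PySem.List.pyGetD cs x ' ' == 'Y'))).Pairwise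
      (fun a b => a < b) :=
    List.Pairwise.filter _ (PySem.List.pairwise_lt_pyRange_one 0 (cs.length : Int))
  rw [PySem.List.sorted_eq_of_perm_of_pairwise_lt _ _ (fun x => x) hperm.symm hpw,
    List.filter_filter]
  apply List.filter_congr
  intro i _
  rw [bndP, isIn_singleton]
  cases h1 : decide (i + 1 < (cs.length : Int)) <;>
    cases h2 : (PySem.List.pyGetD cs (i + 1) ' ' != 'P') <;>
    cases h3 : ((PySem.List.pyGetD cs i ' ' == 'F') || (PySem.List.pyGetD cs i ' ' == 'W') || (PySem.List.pyGetD cs i ' ' == 'Y')) <;>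
    simp
-- B's scanned index list, boundaries only
lemma scan_eq (cs : List Char) :
    (PySem.List.pyRange 0 ((cs.length : Int) + 1) 1).filter (fun i => !(decide (i < (cs.length : Int)) && !bndP cs (cs.length : Int) i)) =
    (PySem.List.pyRange 0 (cs.length : Int) 1).filter (fun i => bndP cs (cs.length : Int) i) ++ [(cs.length : Int)] := by
  have h0n : (0 : Int) ≤ (cs.length : Int) := by positivity
  rw [PySem.List.pyRange_one_succ_right h0n, List.filter_append]
  congr 1
  · apply List.filter_congr
    intro i hi
    have hb := PySem.List.mem_pyRange_one.mp hi
    have hd : decide (i < (cs.length : Int)) = true := by simp; omega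
    cases hB : bndP cs (cs.length : Int) i <;> simp [hd]
  · simp
lemma Aloop (seq : String) (L : List Int) (mc' : Nat) (lo hi : Int) (k : Nat) :
    ((List.range k).map (fun (j : Nat) => (0 : Int) + (j : Int))).foldl (stepA seq L (mc' : Int) lo hi) (0, []) =
      (sGet L k, (List.range k).flatMap (emitT seq L mc' lo hi)) := by
  induction k with
  | zero => simp [sGet]
  | succ k ih =>
    rw [List.range_succ, List.map_append, List.foldl_append, ih, List.flatMap_append]
    simp only [List.map_cons, List.map_nil, List.foldl_cons, List.foldl_nil,
      List.flatMap_cons, List.flatMap_nil, List.append_nil]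
    unfold stepA emitT
    have hidx : (0 : Int) + (k : Int) + (mc' : Int) = ((k + mc' : Nat) : Int) := by push_cast; ring
    have hidx2 : (0 : Int) + (k : Int) = (k : Int) := by ring
    have hs : sGet L (k + 1) = PySem.List.pyGetD L (k : Int) 0 + 1 := by
      simp [sGet]
    rw [hidx, hidx2, hs]
    simp only [Nat.cast_add]
    split_ifs <;> simp
lemma startsOf_len (L : List Int) (mc' j : Nat) : (startsOf L mc' j).length = min j mc' + 1 := by
  simp [startsOf]

lemma Bloop (seq : String) (L : List Int) (mc' : Nat) (lo hi : Int) :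
    ∀ (d j : Nat) (a : List String), j ≤ L.length → L.length - j = d →
    (L.drop j).foldl (gB seq (mc' : Int) lo hi) (startsOf L mc' j, a) =
      (startsOf L mc' L.length, a ++ (List.range' j (L.length - j)).flatMap (emitJ seq L mc' lo hi)) := by
  intro d
  induction d with
  | zero =>
    intro j a hj hd
    have hjl : j = L.length := by omega
    subst hjl
    simp
  | succ d ih =>
    intro j a hj hd
    have hlt : j < L.length := by omega
    rw [List.drop_eq_getElem_cons hlt, List.foldl_cons]
    have hstep : gB seq (mc' : Int) lo hi (startsOf L mc' j, a) L[j] =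
        (startsOf L mc' (j + 1), a ++ emitJ seq L mc' lo hi j) := by
      have hgj : PySem.List.pyGetD L (j : Int) 0 = L[j] := by
        simp [PySem.List.pyGetD_natCast, List.getD, List.getElem?_eq_getElem hlt]
      have hnext : L[j] + 1 = sGet L (j + 1) := by
        simp [sGet, hgj.symm]
      by_cases hmcj : mc' ≤ j
      · have hcond : (((startsOf L mc' j).length : Int)) = (mc' : Int) + 1 := by
          rw [startsOf_len]; push_cast; omega
        have hmin : min j mc' = mc' := by omega
        have hrs : List.range' (j - mc') (min j mc' + 1) = (j - mc') :: List.range' (j - mc' + 1) mc' := by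
          rw [hmin, List.range'_succ]
        have hhead : PySem.List.pyGetD (startsOf L mc' j) 0 0 = sGet L (j - mc') := by
          rw [startsOf, hrs]
          simp [PySem.List.pyGetD_zero_cons]
        have htail : (startsOf L mc' j).tail ++ [L[j] + 1] = startsOf L mc' (j + 1) := by
          rw [startsOf, hrs, hnext, startsOf]
          have h1 : j + 1 - mc' = (j - mc') + 1 := by omega
          have h2 : min (j + 1) mc' = mc' := by omega
          rw [h1, h2, List.range'_1_concat]
          have h3 : j - mc' + 1 + mc' = j + 1 := by omega
          simp [h3]
        rw [gB, if_pos hcond]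
        simp only [hhead, htail]
        rw [emitJ, if_pos hmcj]
        simp only [hgj]
        congr 1
        split_ifs <;> simp
      · have hcond : ¬(((startsOf L mc' j).length : Int)) = (mc' : Int) + 1 := by
          rw [startsOf_len]; push_cast; omega
        have htail : startsOf L mc' j ++ [L[j] + 1] = startsOf L mc' (j + 1) := by
          rw [startsOf, hnext, startsOf]
          have h1 : j - mc' = 0 := by omega
          have h2 : j + 1 - mc' = 0 := by omega
          have h3 : min j mc' = j := by omega
          have h4 : min (j + 1) mc' = j + 1 := by omega
          rw [h1, h2, h3, h4, show List.range' 0 (j + 1 + 1) = List.range' 0 (j + 1) ++ [0 + (j + 1)] from List.range'_1_concat]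
          simp
        rw [gB, if_neg hcond]
        simp only [htail]
        rw [emitJ, if_neg hmcj]
        simp
    rw [hstep, ih (j + 1) (a ++ emitJ seq L mc' lo hi j) (by omega) (by omega)]
    have hr : List.range' j (L.length - j) = j :: List.range' (j + 1) (L.length - (j + 1)) := by
      have : L.length - j = (L.length - (j + 1)) + 1 := by omega
      rw [this, List.range'_succ]
    rw [hr, List.flatMap_cons, List.append_assoc]
lemma bridge (seq : String) (L : List Int) (mc' : Nat) (lo hi : Int) :
    (List.range L.length).flatMap (emitJ seq L mc' lo hi) =
      (List.range (((L.length : Int) - (mc' : Int)).toNat)).flatMap (emitT seq L mc' lo hi) := by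
  by_cases h : mc' ≤ L.length
  · have hK : (((L.length : Int) - (mc' : Int))).toNat = L.length - mc' := Int.toNat_sub _ _
    rw [hK, List.range_eq_range']
    have hsplit : L.length = mc' + (L.length - mc') := by omega
    rw [show List.range' 0 L.length = List.range' 0 mc' ++ List.range' (0 + mc') (L.length - mc') by
        rw [List.range'_append_1, Nat.add_sub_cancel' h],
      List.flatMap_append]
    have hnil : (List.range' 0 mc').flatMap (emitJ seq L mc' lo hi) = [] := by
      apply List.flatMap_eq_nil_iff.mpr
      intro j hj
      have : j < mc' := by
        have := List.mem_range'_1.mp hj; omega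
      rw [emitJ, if_neg (by omega)]
    rw [hnil, List.nil_append, Nat.zero_add, List.range'_eq_map_range, List.flatMap_map]
    have hfun : ∀ t : Nat, emitJ seq L mc' lo hi (mc' + t) = emitT seq L mc' lo hi t := by
      intro t
      rw [emitJ, if_pos (Nat.le_add_right mc' t), emitT]
      have h1 : mc' + t - mc' = t := by omega
      have h2 : mc' + t = t + mc' := by omega
      rw [h1, h2]
    simp only [hfun]
  · have hK : (((L.length : Int) - (mc' : Int))).toNat = 0 := by omega
    rw [hK]
    simp only [List.range_zero, List.flatMap_nil]
    apply List.flatMap_eq_nil_iff.mpr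
    intro j hj
    have : j < L.length := List.mem_range.mp hj
    rw [emitJ, if_neg (by omega)]
-- ===== VERDICT (by name: the statement is the Claim_ definition above) =====
theorem Chymotrypsin_spec : Claim_equal_Chymotrypsin := by
  intro seq mc lo hi _ hPre
  unfold Spec_Chymotrypsin Chymotrypsin Chymotrypsin_alt
  by_cases hg : (PySem.Str.isIn "F" seq || PySem.Str.isIn "W" seq || PySem.Str.isIn "Y" seq) = true
  case neg => rw [if_neg hg, if_neg hg]
  case pos =>
  rw [if_pos hg, if_pos hg]
  have hmc : 0 ≤ mc := by
    rcases hPre with h | h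
    · exact h
    · rw [hg] at h; simp at h
  obtain ⟨mc', rfl⟩ : ∃ m : Nat, mc = (m : Int) := ⟨mc.toNat, (Int.toNat_of_nonneg hmc).symm⟩
  have hlen : PySem.Str.len seq = (seq.toList.length : Int) := by
    simp [PySem.Str.len_eq]
  simp only [hlen]
  rw [boundary_eq seq.toList]
  set L : List Int := (PySem.List.pyRange 0 (seq.toList.length : Int) 1).filter
      (fun i => bndP seq.toList (seq.toList.length : Int) i) ++ [(seq.toList.length : Int)] with hL
  -- A side
  have hA : PySem.List.pyRange 0 ((L.length : Int) - (mc' : Int)) 1 =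
      (List.range (((L.length : Int) - (mc' : Int)).toNat)).map (fun (j : Nat) => (0 : Int) + (j : Int)) := by
    rw [PySem.List.pyRange_one]
    congr 2
    omega
  rw [hA, Aloop seq L mc' lo hi]
  -- B side
  have hstepB : stepB seq seq.toList (seq.toList.length : Int) (mc' : Int) lo hi =
      fun st i => if (decide (i < (seq.toList.length : Int)) && !bndP seq.toList (seq.toList.length : Int) i) then st
        else gB seq (mc' : Int) lo hi st i := rfl
  rw [hstepB, foldl_skip, scan_eq seq.toList, ← hL]
  have hstarts0 : startsOf L mc' 0 = [(0 : Int)] := by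
    simp [startsOf, sGet]
  have hdrop0 : L.drop 0 = L := rfl
  have hB := Bloop seq L mc' lo hi L.length 0 [] (Nat.zero_le _) (by omega)
  rw [hstarts0] at hB
  rw [hdrop0] at hB
  rw [hB]
  simp only [Nat.sub_zero, List.nil_append]
  rw [← List.range_eq_range', bridge seq L mc' lo hi]
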